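-- pv_equiv track=rewrite | github.com/gawseed/distance-graph | distance-graph/distance-graph.py | find_labelIPs
-- ===== SOURCE A (Python) =====
-- def find_labelIPs(cmdIPsDic, cmds):
--     labels2ips = {}
--
--     for cmd in cmds:
--         ipsDic = cmdIPsDic[cmd]
--         labels = list(cmdIPsDic[cmd].keys())
--         for label in labels:
--             if label not in labels2ips:
--                 labels2ips[label] = ipsDic[label]
--             else:
--                 labels2ips[label] = labels2ips[label] + ipsDic[label]
--
--     return labels2ips
-- ===== SOURCE B (Python) =====
-- def find_labelIPs(cmdIPsDic, cmds):
--     # Two-phase decomposition: first index every label to the list of its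
--     # source IP-lists across cmds (first-encounter order), then concatenate
--     # each label's sources left-to-right.
--     groups = {}
--     for cmd in cmds:
--         for label, ips in cmdIPsDic[cmd].items():
--             groups.setdefault(label, []).append(ips)
--     return {label: _concat(sources) for label, sources in groups.items()}
--
--
-- def _concat(sources):
--     total = sources[0]
--     for src in sources[1:]:
--         total = total + src
--     return total
-- ===== Notes on version B (the rewrite author's own statement) =====
-- stated objective: alternative
-- what changed: B replaces A's single pass that rebuilds each label's accumulated list on every hit with a two-phase decomposition: a grouping pass that indexes each label to the list of its per-command source lists, then a concatenation pass over the index.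
import Mathlib
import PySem

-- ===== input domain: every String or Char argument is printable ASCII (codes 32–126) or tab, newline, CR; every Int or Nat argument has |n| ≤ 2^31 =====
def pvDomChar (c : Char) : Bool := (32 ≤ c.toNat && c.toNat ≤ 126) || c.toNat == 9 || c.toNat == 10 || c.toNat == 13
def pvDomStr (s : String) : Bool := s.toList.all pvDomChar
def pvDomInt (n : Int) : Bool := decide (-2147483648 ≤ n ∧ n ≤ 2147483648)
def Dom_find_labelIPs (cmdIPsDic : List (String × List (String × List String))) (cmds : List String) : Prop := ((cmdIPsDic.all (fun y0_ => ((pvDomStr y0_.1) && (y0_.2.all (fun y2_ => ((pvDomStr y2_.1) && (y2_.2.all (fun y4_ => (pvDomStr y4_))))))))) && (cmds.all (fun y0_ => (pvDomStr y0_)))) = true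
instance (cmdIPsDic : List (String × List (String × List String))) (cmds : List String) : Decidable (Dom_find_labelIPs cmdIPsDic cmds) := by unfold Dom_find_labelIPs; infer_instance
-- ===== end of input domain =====

-- B merges the per-command label→IP-list dicts in two phases (group the source
-- lists per label, then concatenate each group) instead of A's single pass that
-- re-extends the accumulated list on every hit; return values are equal.

-- ===== PORT A =====
def find_labelIPs (cmdIPsDic : List (String × List (String × List String))) (cmds : List String) : List (String × List String) :=
  let d : PySem.Dict String (List (String × List String)) := PySem.Dict.mk cmdIPsDic
  (cmds.foldl (fun (labels2ips : PySem.Dict String (List String)) cmd =>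
      let ipsDic : PySem.Dict String (List String) := PySem.Dict.mk ((d.get? cmd).getD [])
      let labels := ipsDic.keys
      labels.foldl (fun l2i label =>
        if l2i.contains label = false then
          l2i.insert label (ipsDic.getD label [])
        else
          l2i.insert label (l2i.getD label [] ++ ipsDic.getD label [])) labels2ips)
    PySem.Dict.empty).items

-- ===== PORT B =====
-- Source B's _concat: start from sources[0], extend with the rest ([] unreachable in B)
def pvConcat (sources : List (List String)) : List String :=
  match sources with
  | [] => []
  | total :: rest => rest.foldl (fun t s => t ++ s) total

def find_labelIPs_alt (cmdIPsDic : List (String × List (String × List String))) (cmds : List String) : List (String × List String) :=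
  let d : PySem.Dict String (List (String × List String)) := PySem.Dict.mk cmdIPsDic
  let groups : PySem.Dict String (List (List String)) :=
    cmds.foldl (fun g cmd =>
      ((d.get? cmd).getD []).foldl (fun g p =>
        -- groups.setdefault(label, []).append(ips)
        g.modify p.1 [] (fun srcs => srcs ++ [p.2])) g)
      PySem.Dict.empty
  groups.items.map (fun p => (p.1, pvConcat p.2))

-- ===== PRECONDITION & SPEC =====
-- Pre_ excludes (i) cmds not present as keys of cmdIPsDic, where A raises KeyError,
-- and (ii) association lists with duplicate keys (outer or inner), which do not
-- denote a Python dict at all.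
def Pre_find_labelIPs (cmdIPsDic : List (String × List (String × List String))) (cmds : List String) : Prop :=
  (∀ cmd ∈ cmds, cmd ∈ cmdIPsDic.map (·.1)) ∧
  (cmdIPsDic.map (·.1)).Nodup ∧
  (∀ p ∈ cmdIPsDic, (p.2.map (·.1)).Nodup)
instance (cmdIPsDic : List (String × List (String × List String))) (cmds : List String) : Decidable (Pre_find_labelIPs cmdIPsDic cmds) := by unfold Pre_find_labelIPs; infer_instance

def pvWitness_find_labelIPs : (List (String × List (String × List String))) × List String :=
  ([("ssh", [("bad", ["1.2.3.4", "5.6.7.8"]), ("good", ["9.9.9.9"])]), ("http", [("bad", ["2.2.2.2"])])], ["ssh", "http"])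

def Spec_find_labelIPs (cmdIPsDic : List (String × List (String × List String))) (cmds : List String) (out : List (String × List String)) : Prop := out = find_labelIPs_alt cmdIPsDic cmds
instance (cmdIPsDic : List (String × List (String × List String))) (cmds : List String) (out : List (String × List String)) : Decidable (Spec_find_labelIPs cmdIPsDic cmds out) := by unfold Spec_find_labelIPs; infer_instance

-- ===== CLAIM (what is proved, stated in full; the proofs are below) =====
def Claim_equal_find_labelIPs : Prop := ∀ (cmdIPsDic : List (String × List (String × List String))) (cmds : List String), Dom_find_labelIPs cmdIPsDic cmds → Pre_find_labelIPs cmdIPsDic cmds → Spec_find_labelIPs cmdIPsDic cmds (find_labelIPs cmdIPsDic cmds)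

-- ===== LEMMAS AND PROOFS =====

-- φ maps a grouped entry to the merged entry; F applies it to a whole dict.
def pvPhi (p : String × List (List String)) : String × List String := (p.1, pvConcat p.2)
def pvF (g : PySem.Dict String (List (List String))) : PySem.Dict String (List String) :=
  PySem.Dict.mk (g.items.map pvPhi)

theorem pvConcat_append (srcs : List (List String)) (v : List String) :
    pvConcat (srcs ++ [v]) = pvConcat srcs ++ v := by
  cases srcs with
  | nil => simp [pvConcat]
  | cons h t => simp [pvConcat, List.foldl_append]
theorem pv_get?_F (g : PySem.Dict String (List (List String))) (l : String) :
    (pvF g).get? l = (g.get? l).map pvConcat := by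
  unfold pvF PySem.Dict.get?
  rw [show (PySem.Dict.mk (g.items.map pvPhi)).items = g.items.map pvPhi from rfl]
  rw [List.find?_map]
  have h : ((fun (p : String × List String) => p.1 == l) ∘ pvPhi)
      = (fun (p : String × List (List String)) => p.1 == l) := by
    funext p; rfl
  rw [h, Option.map_map]
  have h2 : ((fun (x : String × List (List String)) => (pvPhi x).2)) = (pvConcat ∘ fun (x : String × List (List String)) => x.2) := by
    funext p; rfl
  show Option.map (fun x => (pvPhi x).2) _ = _
  rw [h2]
  simp [Option.map_map]
theorem pv_contains_F (g : PySem.Dict String (List (List String))) (l : String) :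
    (pvF g).contains l = g.contains l := by
  unfold pvF PySem.Dict.contains
  rw [show (PySem.Dict.mk (g.items.map pvPhi)).items = g.items.map pvPhi from rfl]
  rw [List.any_map]
  rfl
theorem pv_step (g : PySem.Dict String (List (List String))) (l : String) (v : List String) :
    (if (pvF g).contains l = false then
       (pvF g).insert l v
     else
       (pvF g).insert l ((pvF g).getD l [] ++ v))
    = pvF (g.modify l [] (fun srcs => srcs ++ [v])) := by
  unfold PySem.Dict.modify
  by_cases h : g.contains l = true
  · obtain ⟨srcs, hsrcs⟩ : ∃ s, g.get? l = some s := by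
      have hi := PySem.Dict.contains_eq_isSome_get? (d := g) (k := l)
      rw [h] at hi
      cases hgl : g.get? l with
      | none => rw [hgl] at hi; simp at hi
      | some s => exact ⟨s, rfl⟩
    have hgd : g.getD l [] = srcs := by
      unfold PySem.Dict.getD; rw [hsrcs]; rfl
    have hFgd : (pvF g).getD l [] = pvConcat srcs := by
      unfold PySem.Dict.getD; rw [pv_get?_F, hsrcs]; rfl
    unfold pvF at hFgd
    rw [pv_contains_F, h]
    simp only [Bool.true_eq_false, if_false]
    unfold PySem.Dict.insert
    rw [pv_contains_F, h]
    simp only [if_pos]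
    unfold pvF
    apply PySem.Dict.ext
    show (g.items.map pvPhi).map _ = (g.items.map _).map pvPhi
    rw [List.map_map, List.map_map]
    apply List.map_congr_left
    intro p _
    by_cases hp : (p.1 == l) = true
    · simp only [Function.comp, pvPhi, hp, if_pos, hgd, pvConcat_append, hFgd]
    · simp [Function.comp, pvPhi, hp]
  · have h' : g.contains l = false := by revert h; cases g.contains l <;> simp
    have hgd : g.getD l [] = [] := PySem.Dict.getD_of_not_contains g [] h'
    rw [pv_contains_F, h']
    unfold PySem.Dict.insert
    rw [pv_contains_F, h']
    simp only [Bool.false_eq_true, if_false]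
    rw [hgd]
    unfold pvF
    apply PySem.Dict.ext
    show (g.items.map pvPhi) ++ [(l, v)] = (g.items ++ [(l, [] ++ [v])]).map pvPhi
    rw [List.map_append]
    rfl

-- items-level fold correspondence
theorem pv_fold_items (pairs : List (String × List String)) (g : PySem.Dict String (List (List String))) :
    pairs.foldl (fun l2i p =>
        if l2i.contains p.1 = false then l2i.insert p.1 p.2
        else l2i.insert p.1 (l2i.getD p.1 [] ++ p.2)) (pvF g)
    = pvF (pairs.foldl (fun g p => g.modify p.1 [] (fun srcs => srcs ++ [p.2])) g) := by
  induction pairs generalizing g with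
  | nil => rfl
  | cons p rest ih =>
    simp only [List.foldl_cons]
    rw [pv_step, ih]

-- A's inner loop over labels (with dict lookups) equals the fold over the items list
theorem pv_inner (m : List (String × List String)) (hm : (m.map (·.1)).Nodup)
    (init : PySem.Dict String (List String)) :
    (PySem.Dict.mk m).keys.foldl (fun l2i label =>
        if l2i.contains label = false then
          l2i.insert label ((PySem.Dict.mk m).getD label [])
        else
          l2i.insert label (l2i.getD label [] ++ (PySem.Dict.mk m).getD label [])) init
    = m.foldl (fun l2i p =>
        if l2i.contains p.1 = false then l2i.insert p.1 p.2
        else l2i.insert p.1 (l2i.getD p.1 [] ++ p.2)) init := by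
  rw [PySem.Dict.keys_mk, List.foldl_map]
  apply PySem.List.foldl_congr_mem
  intro acc p hp
  have hget : (PySem.Dict.mk m).getD p.1 [] = p.2 := by
    apply PySem.Dict.getD_of_mem_items (d := PySem.Dict.mk m) (k := p.1) (v := p.2)
    · exact hp
    · rw [PySem.Dict.keys_mk]; exact hm
  rw [hget]

-- whole-fold correspondence over cmds
theorem pv_outer (cmdIPsDic : List (String × List (String × List String)))
    (hin : ∀ p ∈ cmdIPsDic, (p.2.map (·.1)).Nodup)
    (cmds : List String) (g : PySem.Dict String (List (List String))) :
    cmds.foldl (fun labels2ips cmd =>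
      let ipsDic := PySem.Dict.mk (((PySem.Dict.mk cmdIPsDic).get? cmd).getD [])
      let labels := ipsDic.keys
      labels.foldl (fun l2i label =>
        if l2i.contains label = false then l2i.insert label (ipsDic.getD label [])
        else l2i.insert label (l2i.getD label [] ++ ipsDic.getD label [])) labels2ips) (pvF g)
    = pvF (cmds.foldl (fun g cmd =>
        (((PySem.Dict.mk cmdIPsDic).get? cmd).getD []).foldl
          (fun g p => g.modify p.1 [] (fun srcs => srcs ++ [p.2])) g) g) := by
  induction cmds generalizing g with
  | nil => rfl
  | cons cmd rest ih =>
    simp only [List.foldl_cons]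
    have hm : ((((PySem.Dict.mk cmdIPsDic).get? cmd).getD []).map (·.1)).Nodup := by
      cases hf : (PySem.Dict.mk cmdIPsDic).get? cmd with
      | none => simp
      | some m =>
        unfold PySem.Dict.get? at hf
        cases hfind : List.find? (fun p => p.1 == cmd) (PySem.Dict.mk cmdIPsDic).items with
        | none => rw [hfind] at hf; simp at hf
        | some q =>
          rw [hfind] at hf
          simp only [Option.map_some, Option.some.injEq] at hf
          have hq : q ∈ cmdIPsDic := List.mem_of_find?_eq_some hfind
          simpa [hf.symm] using hin q hq
    rw [pv_inner _ hm, pv_fold_items, ih]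

-- ===== VERDICT (by name: the statement is the Claim_ definition above) =====
theorem find_labelIPs_spec : Claim_equal_find_labelIPs := by
  intro cmdIPsDic cmds _hdom hpre
  unfold Spec_find_labelIPs find_labelIPs find_labelIPs_alt
  exact congrArg PySem.Dict.items (pv_outer cmdIPsDic hpre.2.2 cmds PySem.Dict.empty)
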